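-- pv_equiv track=rewrite | github.com/renn-tv/m1ndm4p | ai.py | _normalize_context_text
-- ===== SOURCE A (Python) =====
-- from typing import DefaultDict, Literal, Optional
--
-- def _normalize_context_text(context_markdown: str | None) -> Optional[str]:
--     if not context_markdown:
--         return None
--     lines: list[str] = []
--     previous_blank = False
--     for raw_line in context_markdown.splitlines():
--         line = raw_line.rstrip()
--         stripped = line.strip()
--         if not stripped:
--             if previous_blank:
--                 continue
--             previous_blank = True
--             lines.append("")
--         else:
--             previous_blank = False
--             lines.append(stripped)
--     normalized = "\n".join(lines).strip()
--     return normalized or None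
-- ===== SOURCE B (Python) =====
-- from typing import Optional
--
--
-- def _normalize_context_text(context_markdown: "str | None") -> Optional[str]:
--     if not context_markdown:
--         return None
--     # Paragraph segmentation: scan runs of non-blank stripped lines, join each
--     # run with '\n', join the runs with '\n\n'.  No blank-line bookkeeping and
--     # no final strip are needed: blank lines only ever delimit runs.
--     lines = [raw.strip() for raw in context_markdown.splitlines()]
--     n = len(lines)
--     paragraphs = []
--     i = 0
--     while i < n:
--         if not lines[i]:
--             i += 1
--             continue
--         j = i
--         while j < n and lines[j]:
--             j += 1
--         paragraphs.append("\n".join(lines[i:j]))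
--         i = j
--     return "\n\n".join(paragraphs) or None
-- ===== Notes on version B (the rewrite author's own statement) =====
-- stated objective: alternative
-- what changed: Replaces A's line-by-line emission with a previous_blank flag and a final strip by paragraph segmentation: an index scan finds each maximal run of non-blank stripped lines, each run is joined with '\n' and the runs are joined with '\n\n', so blank lines are never emitted and no trailing strip is needed.
import Mathlib
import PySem

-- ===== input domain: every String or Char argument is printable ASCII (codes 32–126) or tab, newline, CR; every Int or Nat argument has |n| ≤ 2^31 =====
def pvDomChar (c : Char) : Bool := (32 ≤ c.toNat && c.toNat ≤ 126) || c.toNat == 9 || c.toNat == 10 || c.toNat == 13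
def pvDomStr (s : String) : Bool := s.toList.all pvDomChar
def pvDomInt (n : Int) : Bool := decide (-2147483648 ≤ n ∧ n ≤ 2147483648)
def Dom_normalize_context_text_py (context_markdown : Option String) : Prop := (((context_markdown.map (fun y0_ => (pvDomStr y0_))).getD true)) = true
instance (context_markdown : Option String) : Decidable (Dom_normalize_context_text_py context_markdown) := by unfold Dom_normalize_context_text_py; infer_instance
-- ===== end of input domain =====

-- B replaces A's previous_blank flag loop + final strip by paragraph segmentation:
-- scan maximal runs of non-blank stripped lines, join each run with "\n", join runs with "\n\n".

-- ===== PORT A =====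
def normalize_context_text_py (context_markdown : Option String) : Option String :=
  match context_markdown with
  | none => none
  | some s =>
    if s = "" then none
    else
      let st := (PySem.Str.splitlines s).foldl
        (fun (st : List String × Bool) raw_line =>
          let line := PySem.Str.rstrip raw_line
          let stripped := PySem.Str.strip line
          if stripped = "" then
            if st.2 then st else (st.1 ++ [""], true)
          else (st.1 ++ [stripped], false))
        ([], false)
      let normalized := PySem.Str.strip (PySem.Str.join "\n" st.1)
      if normalized = "" then none else some normalized

-- ===== PORT B =====
-- inner while: scan the maximal leading run of non-blank lines (run, remainder)
def pvSpanRun : List String → List String × List String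
  | [] => ([], [])
  | l :: r => if l = "" then ([], l :: r) else ((l :: (pvSpanRun r).1), (pvSpanRun r).2)

theorem pvSpanRun_snd_len : ∀ r : List String, (pvSpanRun r).2.length ≤ r.length := by
  intro r
  induction r with
  | nil => simp [pvSpanRun]
  | cons l t ih =>
    by_cases h : l = "" <;> simp [pvSpanRun, h] <;> try omega

-- outer while: skip blank lines, join each run with "\n", collect the paragraphs
def pvParas : List String → List String
  | [] => []
  | l :: r =>
    if l = "" then pvParas r
    else PySem.Str.join "\n" (l :: (pvSpanRun r).1) :: pvParas (pvSpanRun r).2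
termination_by ls => ls.length
decreasing_by
  all_goals (have := pvSpanRun_snd_len r; simp; try omega)

def normalize_context_text_py_alt (context_markdown : Option String) : Option String :=
  match context_markdown with
  | none => none
  | some s =>
    if s = "" then none
    else
      let lines := (PySem.Str.splitlines s).map PySem.Str.strip
      let paragraphs := pvParas lines
      let res := PySem.Str.join "\n\n" paragraphs
      if res = "" then none else some res

-- ===== PRECONDITION & SPEC =====
def Spec_normalize_context_text_py (context_markdown : Option String) (out : Option String) : Prop := out = normalize_context_text_py_alt context_markdown
instance (context_markdown : Option String) (out : Option String) : Decidable (Spec_normalize_context_text_py context_markdown out) := by unfold Spec_normalize_context_text_py; infer_instance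

-- ===== CLAIM (what is proved, stated in full; the proofs are below) =====
def Claim_equal_normalize_context_text_py : Prop := ∀ (context_markdown : Option String), Dom_normalize_context_text_py context_markdown → Spec_normalize_context_text_py context_markdown (normalize_context_text_py context_markdown)

-- ===== LEMMAS AND PROOFS =====

-- recursive characterisation of A's loop over the already-stripped lines
def pvAG : Bool → List String → List String
  | _, [] => []
  | prev, l :: r =>
    if l = "" then (if prev then pvAG true r else "" :: pvAG true r)
    else l :: pvAG false r

-- paragraphs as raw runs of lines (proof-side view of pvParas before joining)
def pvPs : List String → List (List String)
  | [] => []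
  | l :: r =>
    if l = "" then pvPs r
    else (l :: (pvSpanRun r).1) :: pvPs (pvSpanRun r).2
termination_by ls => ls.length
decreasing_by
  all_goals (have := pvSpanRun_snd_len r; simp; try omega)

-- character-level whitespace facts
theorem pv_dropWhile_idem (p : Char → Bool) (l : List Char) :
    List.dropWhile p (List.dropWhile p l) = List.dropWhile p l := by
  induction l with
  | nil => rfl
  | cons a t ih =>
    by_cases h : p a = true
    · simp [h, ih]
    · simp [h]

theorem pv_dropWhile_append_singleton (p : Char → Bool) (l : List Char) (c : Char) :
    List.dropWhile p (l ++ [c]) =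
      if List.dropWhile p l = [] then (if p c then [] else [c])
      else List.dropWhile p l ++ [c] := by
  induction l with
  | nil => simp [List.dropWhile_cons]
  | cons a t ih =>
    by_cases h : p a = true
    · simpa [List.dropWhile_cons, h] using ih
    · simp [h]

theorem pv_rstrip_cons (c : Char) (t : List Char) :
    PySem.Chars.rstrip (c :: t) =
      if PySem.Chars.rstrip t = [] then (if PySem.Chars.isspace c then [] else [c])
      else c :: PySem.Chars.rstrip t := by
  simp only [PySem.Chars.rstrip, List.reverse_cons]
  rw [pv_dropWhile_append_singleton]
  by_cases h : List.dropWhile PySem.Chars.isspace t.reverse = []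
  · simp [h]
    by_cases hc : PySem.Chars.isspace c = true <;> simp [hc]
  · have : (List.dropWhile PySem.Chars.isspace t.reverse).reverse ≠ [] := by
      simpa using h
    simp [h, this]

theorem pv_lstrip_cons (c : Char) (t : List Char) :
    PySem.Chars.lstrip (c :: t) =
      if PySem.Chars.isspace c then PySem.Chars.lstrip t else c :: t := by
  simp [PySem.Chars.lstrip, List.dropWhile_cons]

theorem pv_lstrip_rstrip_comm (x : List Char) :
    PySem.Chars.lstrip (PySem.Chars.rstrip x) = PySem.Chars.rstrip (PySem.Chars.lstrip x) := by
  induction x with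
  | nil => rfl
  | cons c t ih =>
    rw [pv_rstrip_cons, pv_lstrip_cons]
    by_cases hc : PySem.Chars.isspace c = true
    · by_cases h : PySem.Chars.rstrip t = []
      · simp only [hc, h, if_pos]
        rw [← ih, h]
      · simp only [hc, if_true, if_neg h]
        rw [pv_lstrip_cons]
        simp only [hc, if_true]
        exact ih
    · simp only [hc, if_false, Bool.false_eq_true]
      by_cases h : PySem.Chars.rstrip t = []
      · simp only [h, if_pos]
        rw [pv_lstrip_cons, pv_rstrip_cons]
        simp [hc, h]
      · simp only [if_neg h]
        rw [pv_lstrip_cons, pv_rstrip_cons]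
        simp [hc, h]

theorem pv_rstrip_idem (x : List Char) :
    PySem.Chars.rstrip (PySem.Chars.rstrip x) = PySem.Chars.rstrip x := by
  simp only [PySem.Chars.rstrip, List.reverse_reverse, pv_dropWhile_idem]

theorem pv_lstrip_idem (x : List Char) :
    PySem.Chars.lstrip (PySem.Chars.lstrip x) = PySem.Chars.lstrip x := by
  simp only [PySem.Chars.lstrip, pv_dropWhile_idem]

theorem pv_strip_rstrip_chars (x : List Char) :
    PySem.Chars.strip (PySem.Chars.rstrip x) = PySem.Chars.strip x := by
  simp only [PySem.Chars.strip]
  rw [pv_lstrip_rstrip_comm, pv_rstrip_idem]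

theorem pv_strip_rstrip (x : String) :
    PySem.Str.strip (PySem.Str.rstrip x) = PySem.Str.strip x := by
  simp only [PySem.Str.strip, PySem.Str.rstrip, String.toList_ofList, pv_strip_rstrip_chars]

theorem pv_foldA (ls : List String) (acc : List String) (prev : Bool) :
    (ls.foldl
      (fun (st : List String × Bool) raw_line =>
        let line := PySem.Str.rstrip raw_line
        let stripped := PySem.Str.strip line
        if stripped = "" then
          if st.2 then st else (st.1 ++ [""], true)
        else (st.1 ++ [stripped], false))
      (acc, prev)).1 = acc ++ pvAG prev (ls.map PySem.Str.strip) := by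
  induction ls generalizing acc prev with
  | nil => simp [pvAG]
  | cons raw r ih =>
    simp only [List.foldl_cons, List.map_cons]
    rw [pv_strip_rstrip]
    by_cases h : PySem.Str.strip raw = ""
    · by_cases hp : prev = true
      · simp [h, hp, ih, pvAG]
      · simp only [Bool.not_eq_true] at hp
        simp [h, hp, ih, pvAG]
    · simp [h, ih, pvAG]

theorem pv_strip_idem (x : List Char) :
    PySem.Chars.strip (PySem.Chars.strip x) = PySem.Chars.strip x := by
  simp only [PySem.Chars.strip]
  rw [pv_lstrip_rstrip_comm, pv_rstrip_idem, pv_lstrip_idem]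

theorem pv_str_strip_idem (x : String) :
    PySem.Str.strip (PySem.Str.strip x) = PySem.Str.strip x := by
  simp only [PySem.Str.strip, String.toList_ofList, pv_strip_idem]

theorem pv_isspace_newline : PySem.Chars.isspace '\n' = true := by decide

theorem pv_strip_newline_cons (t : List Char) :
    PySem.Chars.strip ('\n' :: t) = PySem.Chars.strip t := by
  simp [PySem.Chars.strip, PySem.Chars.lstrip, List.dropWhile_cons, pv_isspace_newline]

theorem pv_rstrip_append_newline (t : List Char) :
    PySem.Chars.rstrip (t ++ ['\n']) = PySem.Chars.rstrip t := by
  simp [PySem.Chars.rstrip, List.reverse_append, List.dropWhile_cons, pv_isspace_newline]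

theorem pv_strip_append_newline (t : List Char) :
    PySem.Chars.strip (t ++ ['\n']) = PySem.Chars.strip t := by
  simp only [PySem.Chars.strip, PySem.Chars.lstrip]
  rw [List.dropWhile_append]
  by_cases h : (List.dropWhile PySem.Chars.isspace t).isEmpty
  · simp only [h, if_true]
    have h' : List.dropWhile PySem.Chars.isspace t = [] := by
      simpa [List.isEmpty_iff] using h
    simp [List.dropWhile_cons, pv_isspace_newline, h', PySem.Chars.rstrip]
  · simp only [h, if_false]
    exact pv_rstrip_append_newline _

-- both boundary characters are non-space
def pvGood (y : List Char) : Prop :=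
  (∃ c t, y = c :: t ∧ PySem.Chars.isspace c = false) ∧
  (∃ c t, y.reverse = c :: t ∧ PySem.Chars.isspace c = false)

theorem pv_strip_fix_of_good (y : List Char) (h : pvGood y) : PySem.Chars.strip y = y := by
  obtain ⟨⟨c, t, hy, hc⟩, ⟨d, u, hrev, hd⟩⟩ := h
  have hl : PySem.Chars.lstrip y = y := by
    rw [hy, pv_lstrip_cons, hc]
    simp
  have hr : PySem.Chars.rstrip y = y := by
    simp only [PySem.Chars.rstrip, hrev, List.dropWhile_cons, hd]
    simp [← hrev]
  simp only [PySem.Chars.strip, hl, hr]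

theorem pv_good_of_strip_fix (y : List Char) (h : PySem.Chars.strip y = y) (hne : y ≠ []) :
    pvGood y := by
  have hlenr : ∀ z : List Char, (PySem.Chars.rstrip z).length ≤ z.length := by
    intro z
    simp only [PySem.Chars.rstrip, List.length_reverse]
    have := List.length_dropWhile_le PySem.Chars.isspace z.reverse
    simpa using this
  have hlenl : ∀ z : List Char, (PySem.Chars.lstrip z).length ≤ z.length :=
    fun z => List.length_dropWhile_le _ z
  have hLlen : (PySem.Chars.lstrip y).length = y.length := by
    have h1 := hlenr (PySem.Chars.lstrip y)
    have h2 := hlenl y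
    have h3 : (PySem.Chars.strip y).length = y.length := by rw [h]
    simp only [PySem.Chars.strip] at h3
    omega
  have hL : PySem.Chars.lstrip y = y :=
    List.IsSuffix.eq_of_length (List.dropWhile_suffix _) hLlen
  have hR : PySem.Chars.rstrip y = y := by
    have := h
    simp only [PySem.Chars.strip, hL] at this
    exact this
  constructor
  · obtain ⟨c, t, rfl⟩ := List.exists_cons_of_ne_nil hne
    refine ⟨c, t, rfl, ?_⟩
    by_contra hc
    have hc' : PySem.Chars.isspace c = true := by
      simpa using hc
    have := hL
    simp only [PySem.Chars.lstrip, List.dropWhile_cons, hc', if_true] at this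
    have := congrArg List.length this
    have hd := List.length_dropWhile_le PySem.Chars.isspace t
    simp at this
    omega
  · have hrevne : y.reverse ≠ [] := by simpa using hne
    obtain ⟨c, t, hrev⟩ := List.exists_cons_of_ne_nil hrevne
    refine ⟨c, t, hrev, ?_⟩
    by_contra hc
    have hc' : PySem.Chars.isspace c = true := by
      simpa using hc
    have hR' : List.dropWhile PySem.Chars.isspace y.reverse = y.reverse := by
      have := congrArg List.reverse hR
      simpa [PySem.Chars.rstrip] using this
    rw [hrev] at hR'
    simp only [List.dropWhile_cons, hc', if_true] at hR'
    have := congrArg List.length hR'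
    have hd := List.length_dropWhile_le PySem.Chars.isspace t
    simp at this
    omega

-- generic intercalate facts
theorem pv_inter_cons₂ {α : Type} (sep a b : List α) (t : List (List α)) :
    List.intercalate sep (a :: b :: t) = a ++ sep ++ List.intercalate sep (b :: t) := by
  simp [List.intercalate, List.intersperse]

theorem pv_inter_append {α : Type} (sep : List α) (xs ys : List (List α))
    (hx : xs ≠ []) (hy : ys ≠ []) :
    List.intercalate sep (xs ++ ys) = List.intercalate sep xs ++ sep ++ List.intercalate sep ys := by
  induction xs with
  | nil => exact absurd rfl hx
  | cons a xs' ih =>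
    cases xs' with
    | nil =>
      obtain ⟨b, t, rfl⟩ := List.exists_cons_of_ne_nil hy
      simp [pv_inter_cons₂, List.intercalate]
    | cons a' t' =>
      have h2 := ih (by simp)
      simp only [List.cons_append] at h2 ⊢
      rw [pv_inter_cons₂, h2, pv_inter_cons₂]
      simp [List.append_assoc]

theorem pv_map_inter {α β : Type} (g : α → β) (sep : List α) (xs : List (List α)) :
    (List.intercalate sep xs).map g = List.intercalate (sep.map g) (xs.map (List.map g)) := by
  induction xs with
  | nil => simp [List.intercalate]
  | cons a t ih =>
    cases t with
    | nil => simp [List.intercalate]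
    | cons b u =>
      have ih' : List.map g (sep.intercalate (b :: u))
          = (sep.map g).intercalate (List.map g b :: u.map (List.map g)) := by
        simpa using ih
      simp only [List.map_cons]
      rw [pv_inter_cons₂, pv_inter_cons₂]
      simp only [List.map_append]
      rw [ih']

theorem pv_good_inter (sep : List Char) (xs : List (List Char))
    (h : ∀ x ∈ xs, pvGood x) (hne : xs ≠ []) : pvGood (List.intercalate sep xs) := by
  induction xs with
  | nil => exact absurd rfl hne
  | cons a t ih =>
    cases t with
    | nil => simpa [List.intercalate] using h a (by simp)
    | cons b u =>
      have ha := h a (by simp)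
      have hrest : pvGood (List.intercalate sep (b :: u)) :=
        ih (fun x hx => h x (by simp [hx])) (by simp)
      rw [pv_inter_cons₂]
      constructor
      · obtain ⟨⟨c, t', hy, hc⟩, _⟩ := ha
        exact ⟨c, t' ++ sep ++ List.intercalate sep (b :: u), by simp [hy], hc⟩
      · obtain ⟨_, ⟨c, t', hy, hc⟩⟩ := hrest
        refine ⟨c, t' ++ sep.reverse ++ a.reverse, ?_, hc⟩
        simp [List.reverse_append, hy, List.append_assoc]

-- join-doubling: joining the ""-interleaved runs with "\n" equals joining the
-- "\n"-joined runs with "\n\n"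
theorem pv_inter_ne_nil {α : Type} (sep a : List α) (t : List (List α)) (ha : a ≠ []) :
    List.intercalate sep (a :: t) ≠ [] := by
  cases t with
  | nil => simpa [List.intercalate]
  | cons b u => rw [pv_inter_cons₂]; simp [ha]

theorem pv_doubling (qs : List (List (List Char))) (h : ∀ q ∈ qs, q ≠ []) :
    List.intercalate ['\n'] (List.intercalate [[]] qs) =
      List.intercalate ['\n', '\n'] (qs.map (List.intercalate ['\n'])) := by
  induction qs with
  | nil => simp [List.intercalate]
  | cons q t ih =>
    cases t with
    | nil => simp [List.intercalate]
    | cons q' u =>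
      have hq : q ≠ [] := h q (by simp)
      have hq' : q' ≠ [] := h q' (by simp)
      have hI2 : List.intercalate [([] : List Char)] (q' :: u) ≠ [] :=
        pv_inter_ne_nil _ _ _ hq'
      obtain ⟨z, w, hzw⟩ := List.exists_cons_of_ne_nil hI2
      rw [pv_inter_cons₂, List.append_assoc,
        pv_inter_append ['\n'] q ([[]] ++ List.intercalate [[]] (q' :: u)) hq (by simp)]
      have hcons : ([[]] : List (List Char)) ++ List.intercalate [[]] (q' :: u)
          = [] :: List.intercalate [[]] (q' :: u) := rfl
      rw [hcons, hzw, pv_inter_cons₂, ← hzw, ih (fun x hx => h x (by simp [hx]))]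
      simp only [List.map_cons]
      rw [pv_inter_cons₂]
      simp [List.append_assoc]

-- membership facts about the runs
theorem pv_span_fst_mem (r : List String) : ∀ x ∈ (pvSpanRun r).1, x ≠ "" ∧ x ∈ r := by
  induction r with
  | nil => simp [pvSpanRun]
  | cons l t ih =>
    by_cases h : l = ""
    · simp [pvSpanRun, h]
    · intro x hx
      simp only [pvSpanRun, h, if_neg] at hx
      simp only [if_false] at hx
      rcases List.mem_cons.mp hx with h1 | h1
      · subst h1; exact ⟨h, by simp⟩
      · obtain ⟨hne, hmem⟩ := ih x h1
        exact ⟨hne, by simp [hmem]⟩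

theorem pv_span_snd_sub (r : List String) : ∀ x ∈ (pvSpanRun r).2, x ∈ r := by
  induction r with
  | nil => simp [pvSpanRun]
  | cons l t ih =>
    by_cases h : l = ""
    · simp [pvSpanRun, h]
    · intro x hx
      simp only [pvSpanRun, h, if_false] at hx
      exact List.mem_cons_of_mem _ (ih x hx)

theorem pv_span_snd_shape (r : List String) :
    (pvSpanRun r).2 = [] ∨ ∃ t, (pvSpanRun r).2 = "" :: t := by
  induction r with
  | nil => simp [pvSpanRun]
  | cons l t ih =>
    by_cases h : l = ""
    · right; exact ⟨t, by simp [pvSpanRun, h]⟩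
    · simpa [pvSpanRun, h] using ih

theorem pv_ps_mem : ∀ (n : Nat) (ls : List String), ls.length ≤ n →
    ∀ p ∈ pvPs ls, p ≠ [] ∧ ∀ x ∈ p, x ≠ "" ∧ x ∈ ls := by
  intro n
  induction n with
  | zero =>
    intro ls hlen
    have : ls = [] := by cases ls <;> simp_all
    subst this
    simp [pvPs]
  | succ n ih =>
    intro ls hlen p hp
    cases ls with
    | nil => simp [pvPs] at hp
    | cons l r =>
      by_cases h : l = ""
      · rw [pvPs, if_pos h] at hp
        obtain ⟨hne, hx⟩ := ih r (by simpa using hlen) p hp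
        exact ⟨hne, fun x hxm => ⟨(hx x hxm).1, List.mem_cons_of_mem _ (hx x hxm).2⟩⟩
      · rw [pvPs, if_neg h] at hp
        rcases List.mem_cons.mp hp with h1 | h1
        · subst h1
          refine ⟨by simp, fun x hxm => ?_⟩
          rcases List.mem_cons.mp hxm with h2 | h2
          · subst h2; exact ⟨h, by simp⟩
          · obtain ⟨hne, hmem⟩ := pv_span_fst_mem r x h2
            exact ⟨hne, List.mem_cons_of_mem _ hmem⟩
        · have hlen2 : (pvSpanRun r).2.length ≤ n := by
            have := pvSpanRun_snd_len r
            simp at hlen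
            omega
          obtain ⟨hne, hx⟩ := ih (pvSpanRun r).2 hlen2 p h1
          refine ⟨hne, fun x hxm => ⟨(hx x hxm).1,
            List.mem_cons_of_mem _ (pv_span_snd_sub r x (hx x hxm).2)⟩⟩

theorem pv_paras_eq : ∀ (n : Nat) (ls : List String), ls.length ≤ n →
    pvParas ls = (pvPs ls).map (PySem.Str.join "\n") := by
  intro n
  induction n with
  | zero =>
    intro ls hlen
    have : ls = [] := by cases ls <;> simp_all
    subst this
    simp [pvParas, pvPs]
  | succ n ih =>
    intro ls hlen
    cases ls with
    | nil => simp [pvParas, pvPs]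
    | cons l r =>
      by_cases h : l = ""
      · rw [pvParas, pvPs, if_pos h, if_pos h]
        exact ih r (by simpa using hlen)
      · rw [pvParas, pvPs, if_neg h, if_neg h, List.map_cons]
        have hlen2 : (pvSpanRun r).2.length ≤ n := by
          have := pvSpanRun_snd_len r
          simp at hlen
          omega
        rw [ih (pvSpanRun r).2 hlen2]

-- relating A's selection to the runs
theorem pv_runA (r : List String) :
    pvAG false r = (pvSpanRun r).1 ++
      (match (pvSpanRun r).2 with
       | [] => ([] : List String)
       | _ :: t => "" :: pvAG true t) := by
  induction r with
  | nil => simp [pvAG, pvSpanRun]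
  | cons l t ih =>
    by_cases h : l = ""
    · simp [pvAG, pvSpanRun, h]
    · simp [pvAG, pvSpanRun, h, ih]

-- shape: A's selection is the runs interleaved with single blank separators,
-- up to one trailing blank line
theorem pv_shape : ∀ (n : Nat) (ls : List String), ls.length ≤ n →
    pvAG true ls = List.intercalate [""] (pvPs ls) ∨
      (pvPs ls ≠ [] ∧ pvAG true ls = List.intercalate [""] (pvPs ls) ++ [""]) := by
  intro n
  induction n with
  | zero =>
    intro ls hlen
    have : ls = [] := by cases ls <;> simp_all
    subst this
    simp [pvAG, pvPs, List.intercalate]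
  | succ n ih =>
    intro ls hlen
    cases ls with
    | nil => simp [pvAG, pvPs, List.intercalate]
    | cons l r =>
      by_cases h : l = ""
      · rw [pvPs, if_pos h]
        have hAG : pvAG true (l :: r) = pvAG true r := by simp [pvAG, h]
        rw [hAG]
        exact ih r (by simpa using hlen)
      · rw [pvPs, if_neg h]
        have hAG : pvAG true (l :: r) = l :: pvAG false r := by simp [pvAG, h]
        rw [hAG, pv_runA r]
        rcases pv_span_snd_shape r with hsnd | ⟨t, hsnd⟩
        · -- no blank after the run: a single paragraph ends the input
          rw [hsnd]
          left
          simp [pvPs, List.intercalate]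
        · -- a blank follows the run
          rw [hsnd]
          have hps : pvPs ("" :: t) = pvPs t := by rw [pvPs]; simp
          have hmatch : (match ("" :: t : List String) with
              | [] => ([] : List String)
              | _ :: t => "" :: pvAG true t) = "" :: pvAG true t := rfl
          rw [hps, hmatch]
          have hlen2 : t.length ≤ n := by
            have h1 := pvSpanRun_snd_len r
            rw [hsnd] at h1
            simp at h1 hlen
            omega
          rcases ih t hlen2 with hIH | ⟨hne, hIH⟩
          · by_cases hpt : pvPs t = []
            · right
              rw [hpt] at hIH ⊢
              simp [List.intercalate] at hIH ⊢
              simp [hIH]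
            · left
              obtain ⟨p0, ps', hpt'⟩ := List.exists_cons_of_ne_nil hpt
              rw [hIH, hpt', pv_inter_cons₂]
              simp [List.intercalate, List.append_assoc]
          · right
            refine ⟨by simp, ?_⟩
            by_cases hpt : pvPs t = []
            · exact absurd hpt hne
            · obtain ⟨p0, ps', hpt'⟩ := List.exists_cons_of_ne_nil hpt
              rw [hIH, hpt', pv_inter_cons₂]
              simp [List.intercalate, List.append_assoc]

-- Str-level bridge lemmas
theorem pv_stripJoin_cons_empty (ks : List String) :
    PySem.Str.strip (PySem.Str.join "\n" ("" :: ks))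
      = PySem.Str.strip (PySem.Str.join "\n" ks) := by
  cases ks with
  | nil => rfl
  | cons k r =>
    simp only [PySem.Str.join, List.map_cons, PySem.Chars.join, PySem.Str.strip,
      String.toList_ofList]
    have : List.intercalate "\n".toList ("".toList :: k.toList :: r.map String.toList)
        = '\n' :: List.intercalate "\n".toList (k.toList :: r.map String.toList) := by
      simp [List.intercalate, List.intersperse]
    rw [this, pv_strip_newline_cons]

theorem pv_toList_newline : "\n".toList = ['\n'] := rfl

theorem pv_toList_join (sep : String) (parts : List String) :
    (PySem.Str.join sep parts).toList
      = List.intercalate sep.toList (parts.map String.toList) := by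
  simp [PySem.Str.join, PySem.Chars.join]

theorem pv_stripJoin_append_empty (ks : List String) :
    PySem.Str.strip (PySem.Str.join "\n" (ks ++ [""]))
      = PySem.Str.strip (PySem.Str.join "\n" ks) := by
  cases ks with
  | nil => rfl
  | cons k r =>
    simp only [PySem.Str.strip, pv_toList_join, pv_toList_newline, List.map_append,
      List.map_cons, List.map_nil]
    rw [pv_inter_append ['\n'] (k.toList :: r.map String.toList) [("".toList)]
      (by simp) (by simp)]
    have h1 : List.intercalate ['\n'] [("".toList)] = [] := by
      simp [List.intercalate]
    rw [h1, List.append_nil, pv_strip_append_newline]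

theorem pv_str_strip_fix (x : String) (h : pvGood x.toList) : PySem.Str.strip x = x := by
  rw [PySem.Str.strip, pv_strip_fix_of_good _ h, String.ofList_toList]

theorem pv_join_doubling (ps : List (List String)) (h : ∀ p ∈ ps, p ≠ []) :
    PySem.Str.join "\n" (List.intercalate [""] ps)
      = PySem.Str.join "\n\n" (ps.map (PySem.Str.join "\n")) := by
  have hchars : (PySem.Str.join "\n" (List.intercalate [""] ps)).toList
      = (PySem.Str.join "\n\n" (ps.map (PySem.Str.join "\n"))).toList := by
    rw [pv_toList_join, pv_toList_join, pv_toList_newline]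
    have hL : (List.intercalate [""] ps).map String.toList
        = List.intercalate [[]] (ps.map (List.map String.toList)) := by
      have := pv_map_inter String.toList [""] ps
      simpa using this
    have hR : (ps.map (PySem.Str.join "\n")).map String.toList
        = (ps.map (List.map String.toList)).map (List.intercalate ['\n']) := by
      simp only [List.map_map]
      apply List.map_congr_left
      intro p hp
      simp [Function.comp, pv_toList_join, pv_toList_newline, PySem.Chars.join]
    rw [hL, hR]
    have hsep : ("\n\n".toList) = ['\n', '\n'] := rfl
    rw [hsep]
    exact pv_doubling _ (by
      intro q hq
      simp only [List.mem_map] at hq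
      obtain ⟨p, hp, rfl⟩ := hq
      simpa using h p hp)
  calc PySem.Str.join "\n" (List.intercalate [""] ps)
      = String.ofList (PySem.Str.join "\n" (List.intercalate [""] ps)).toList := by
        rw [String.ofList_toList]
    _ = String.ofList (PySem.Str.join "\n\n" (ps.map (PySem.Str.join "\n"))).toList := by
        rw [hchars]
    _ = PySem.Str.join "\n\n" (ps.map (PySem.Str.join "\n")) := by
        rw [String.ofList_toList]

-- the key equality over the stripped lines
theorem pv_key (ls : List String) (hP : ∀ e ∈ ls, PySem.Str.strip e = e) :
    PySem.Str.strip (PySem.Str.join "\n" (pvAG false ls)) =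
      PySem.Str.join "\n\n" (pvParas ls) := by
  -- step 1: a possible leading blank line is absorbed by the strip
  have hA : PySem.Str.strip (PySem.Str.join "\n" (pvAG false ls))
      = PySem.Str.strip (PySem.Str.join "\n" (pvAG true ls)) := by
    cases ls with
    | nil => rfl
    | cons l r =>
      by_cases h : l = ""
      · have h1 : pvAG false (l :: r) = "" :: pvAG true r := by simp [pvAG, h]
        have h2 : pvAG true (l :: r) = pvAG true r := by simp [pvAG, h]
        rw [h1, h2, pv_stripJoin_cons_empty]
      · have h1 : pvAG false (l :: r) = l :: pvAG false r := by simp [pvAG, h]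
        have h2 : pvAG true (l :: r) = l :: pvAG false r := by simp [pvAG, h]
        rw [h1, h2]
  rw [hA, pv_paras_eq ls.length ls le_rfl]
  have hmem := pv_ps_mem ls.length ls le_rfl
  have hne : ∀ p ∈ pvPs ls, p ≠ [] := fun p hp => (hmem p hp).1
  -- each joined paragraph has non-space boundary characters
  have hJ1good : ∀ p ∈ pvPs ls, pvGood ((PySem.Str.join "\n" p).toList) := by
    intro p hp
    rw [pv_toList_join, pv_toList_newline]
    refine pv_good_inter _ _ ?_ (by simpa using hne p hp)
    intro x hx
    simp only [List.mem_map] at hx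
    obtain ⟨e, he, rfl⟩ := hx
    obtain ⟨hene, hels⟩ := (hmem p hp).2 e he
    have hfix : PySem.Chars.strip e.toList = e.toList := by
      have := congrArg String.toList (hP e hels)
      simpa [PySem.Str.strip] using this
    refine pv_good_of_strip_fix _ hfix ?_
    intro hnil
    apply hene
    have := congrArg String.ofList hnil
    simpa using this
  by_cases hps : pvPs ls = []
  · -- no content at all: both sides are the empty string
    rcases pv_shape ls.length ls le_rfl with hsh | ⟨hne', _⟩
    · rw [hps] at hsh ⊢
      simp only [List.intercalate] at hsh
      simp only [hsh]
      rfl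
    · exact absurd hps hne'
  · -- at least one paragraph
    have hstep : PySem.Str.strip (PySem.Str.join "\n" (pvAG true ls))
        = PySem.Str.strip (PySem.Str.join "\n" (List.intercalate [""] (pvPs ls))) := by
      rcases pv_shape ls.length ls le_rfl with hsh | ⟨_, hsh⟩
      · rw [hsh]
      · rw [hsh, pv_stripJoin_append_empty]
    rw [hstep, pv_join_doubling _ hne]
    apply pv_str_strip_fix
    rw [pv_toList_join]
    have hsep : ("\n\n".toList) = ['\n', '\n'] := rfl
    rw [hsep]
    refine pv_good_inter _ _ ?_ (by simpa using hps)
    intro x hx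
    simp only [List.map_map, List.mem_map] at hx
    obtain ⟨p, hp, rfl⟩ := hx
    exact hJ1good p hp

-- ===== VERDICT (by name: the statement is the Claim_ definition above) =====
theorem normalize_context_text_py_spec : Claim_equal_normalize_context_text_py := by
  intro cm _
  unfold Spec_normalize_context_text_py normalize_context_text_py normalize_context_text_py_alt
  cases cm with
  | none => rfl
  | some s =>
    by_cases hs : s = ""
    · simp [hs]
    · simp only [hs]
      rw [pv_foldA]
      simp only [List.nil_append]
      have hP : ∀ e ∈ (PySem.Str.splitlines s).map PySem.Str.strip,
          PySem.Str.strip e = e := by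
        intro e he
        simp only [List.mem_map] at he
        obtain ⟨raw, _, rfl⟩ := he
        exact pv_str_strip_idem raw
      rw [pv_key _ hP]
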